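-- pv_equiv track=rewrite | github.com/lizuAg/Algorithm-high | 전예진/Graph/prob1.py | solution
-- ===== SOURCE A (Python) =====
-- from collections import deque
--
-- def solution(n, edge):
--     graph = {i: [] for i in range(1, n+1)}
--
--     for e in edge:
--         a, b = e
--         graph[a].append(b)
--         graph[b].append(a)
--
--     def bfs(start):
--         visited = [False] * (n + 1)
--         queue = deque([(start, 0)])
--         max_distance = 0
--         count = 0
--
--         while queue:
--             node, distance = queue.popleft()
--
--             if not visited[node]:
--                 visited[node] = True
--
--                 if distance > max_distance:
--                     max_distance = distance
--                     count = 1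
--                 elif distance == max_distance:
--                     count += 1
--
--                 for neighbor in graph[node]:
--                     if not visited[neighbor]:
--                         queue.append((neighbor, distance + 1))
--
--         return count
--
--     return bfs(1)
-- ===== SOURCE B (Python) =====
-- def solution(n, edge):
--     graph = {i: [] for i in range(1, n + 1)}
--     for e in edge:
--         a, b = e
--         graph[a].append(b)
--         graph[b].append(a)
--     visited = set()
--     pend = [1]
--     count = 0
--     while pend:
--         fresh = 0
--         nxt = []
--         for node in pend:
--             if node not in visited:
--                 visited.add(node)
--                 fresh += 1
--                 nxt += [nb for nb in graph[node] if nb not in visited]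
--         if fresh:
--             count = fresh
--         pend = nxt
--     return count
-- ===== Notes on version B (the rewrite author's own statement) =====
-- stated objective: alternative
-- what changed: Replaces A's single FIFO deque of (node,distance) pairs with running max/count bookkeeping by a level-order BFS that processes one frontier list per round with a visited set and returns the size of the last round that discovered new nodes; no distances are stored at all.
import Mathlib
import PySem

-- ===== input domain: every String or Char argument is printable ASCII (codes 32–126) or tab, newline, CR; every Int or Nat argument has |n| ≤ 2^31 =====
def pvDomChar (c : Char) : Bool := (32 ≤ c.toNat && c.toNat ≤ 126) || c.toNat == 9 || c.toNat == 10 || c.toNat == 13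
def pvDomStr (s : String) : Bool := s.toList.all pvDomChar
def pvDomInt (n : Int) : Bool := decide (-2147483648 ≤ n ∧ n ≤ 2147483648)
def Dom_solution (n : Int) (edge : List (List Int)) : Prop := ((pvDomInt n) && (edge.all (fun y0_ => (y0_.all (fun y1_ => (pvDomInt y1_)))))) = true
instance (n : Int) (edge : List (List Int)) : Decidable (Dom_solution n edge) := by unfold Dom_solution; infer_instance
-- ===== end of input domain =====

-- B replaces A's FIFO deque of (node,distance) pairs and inline max/count bookkeeping by a
-- level-order BFS over frontier lists, returning the size of the last productive level.

-- ===== PORT A =====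
-- graph = {i: [] for i in range(1, n+1)}; for e in edge: a, b = e; graph[a].append(b); graph[b].append(a)
def buildGraphA (n : Int) (edge : List (List Int)) : PySem.Dict Int (List Int) :=
  edge.foldl (fun g e =>
      match e with
      | [a, b] => (g.modify a [] (fun l => l ++ [b])).modify b [] (fun l => l ++ [a])
      | _ => g)
    ((PySem.List.pyRange 1 (n + 1) 1).foldl (fun g i => g.insert i ([] : List Int)) PySem.Dict.empty)

-- the 'while queue' loop of bfs(start); fuel 2*len(edge)+2 bounds the number of pops
-- (1 initial entry + at most 2*len(edge) enqueues, one per directed adjacency entry)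
def bfsLoopA (graph : PySem.Dict Int (List Int)) :
    Nat → List (Int × Int) → List Bool → Int → Int → Int
  | 0, _, _, _, count => count
  | _ + 1, [], _, _, count => count
  | f + 1, (node, dist) :: queue, visited, maxd, count =>
    if PySem.List.pyGetD visited node false then
      bfsLoopA graph f queue visited maxd count
    else
      bfsLoopA graph f
        ((graph.getD node []).foldl
          (fun q nb =>
            if !(PySem.List.pyGetD (PySem.List.pySetD visited node true) nb false) then
              q ++ [(nb, dist + 1)]
            else q)
          queue)
        (PySem.List.pySetD visited node true)
        (if dist > maxd then dist else maxd)
        (if dist > maxd then 1 else if dist = maxd then count + 1 else count)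

def solution (n : Int) (edge : List (List Int)) : Int :=
  bfsLoopA (buildGraphA n edge) (2 * edge.length + 2) [(1, 0)]
    (List.replicate (n + 1).toNat false) 0 0

-- ===== PORT B =====
def buildGraphB (n : Int) (edge : List (List Int)) : PySem.Dict Int (List Int) :=
  edge.foldl (fun g e =>
      match e with
      | [a, b] => (g.modify a [] (fun l => l ++ [b])).modify b [] (fun l => l ++ [a])
      | _ => g)
    ((PySem.List.pyRange 1 (n + 1) 1).foldl (fun g i => g.insert i ([] : List Int)) PySem.Dict.empty)

-- body of 'for node in pend': skip if visited, else mark, bump fresh, extend nxt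
def levelB (graph : PySem.Dict Int (List Int))
    (st : PySem.Set Int × Int × List Int) (node : Int) : PySem.Set Int × Int × List Int :=
  if PySem.Set.contains st.1 node then st
  else
    (PySem.Set.add st.1 node, st.2.1 + 1,
      st.2.2 ++ (graph.getD node []).filter
        (fun nb => !(PySem.Set.contains (PySem.Set.add st.1 node) nb)))

-- the 'while pend' loop; fuel n+2 bounds the number of levels
def bfsLoopB (graph : PySem.Dict Int (List Int)) :
    Nat → PySem.Set Int → List Int → Int → Int
  | 0, _, _, count => count
  | f + 1, visited, pend, count =>
    if pend.isEmpty then count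
    else
      let st := pend.foldl (levelB graph) (visited, (0 : Int), ([] : List Int))
      bfsLoopB graph f st.1 st.2.2 (if st.2.1 ≠ 0 then st.2.1 else count)

def solution_alt (n : Int) (edge : List (List Int)) : Int :=
  bfsLoopB (buildGraphB n edge) (n.toNat + 2) PySem.Set.empty [1] 0

-- ===== PRECONDITION & SPEC =====
-- Pre excludes exactly the inputs where the Python raises: n < 1 (IndexError on visited[1])
-- and edges that are not pairs of endpoints in 1..n (ValueError / KeyError).
def Pre_solution (n : Int) (edge : List (List Int)) : Prop :=
  1 ≤ n ∧ ∀ e ∈ edge, e.length = 2 ∧ ∀ v ∈ e, 1 ≤ v ∧ v ≤ n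
instance (n : Int) (edge : List (List Int)) : Decidable (Pre_solution n edge) := by
  unfold Pre_solution; infer_instance

def pvWitness_solution : Int × List (List Int) := (4, [[1, 2], [2, 3], [2, 4]])

def Spec_solution (n : Int) (edge : List (List Int)) (out : Int) : Prop := out = solution_alt n edge
instance (n : Int) (edge : List (List Int)) (out : Int) : Decidable (Spec_solution n edge out) := by
  unfold Spec_solution; infer_instance

-- ===== CLAIM (what is proved, stated in full; the proofs are below) =====
def Claim_equal_solution : Prop := ∀ (n : Int) (edge : List (List Int)),
  Dom_solution n edge → Pre_solution n edge → Spec_solution n edge (solution n edge)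

-- ===== LEMMAS AND PROOFS =====

-- proof-side abstractions
def pvAdj (G : PySem.Dict Int (List Int)) (x : Int) : List Int := G.getD x []

def pvVGet (v : List Bool) (x : Int) : Bool := PySem.List.pyGetD v x false

def pvNodes (n : Int) : List Int := PySem.List.pyRange 1 (n + 1) 1

-- A's processing of one level: (new visited, number of fresh nodes, next pending list)
def pvProcA (G : PySem.Dict Int (List Int)) (v : List Bool) : List Int → List Bool × Nat × List Int
  | [] => (v, 0, [])
  | x :: rest =>
    if pvVGet v x then pvProcA G v rest
    else
      let r := pvProcA G (PySem.List.pySetD v x true) rest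
      (r.1, r.2.1 + 1,
        (pvAdj G x).filter (fun nb => !(pvVGet (PySem.List.pySetD v x true) nb)) ++ r.2.2)

def pvPhi (n : Int) (G : PySem.Dict Int (List Int)) (v : List Bool) : Nat :=
  ((pvNodes n).map (fun y => if pvVGet v y then 0 else (pvAdj G y).length)).sum

def pvFC (n : Int) (v : List Bool) : Nat :=
  ((pvNodes n).map (fun y => if pvVGet v y then 0 else 1)).sum

def pvRel (n : Int) (v : List Bool) (s : PySem.Set Int) : Prop :=
  ∀ x : Int, 1 ≤ x → x ≤ n → pvVGet v x = PySem.Set.contains s x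

def pvUpdM (d m : Int) (fr : Nat) : Int := if fr = 0 then m else if d > m then d else m
def pvUpdC (d m c : Int) (fr : Nat) : Int :=
  if fr = 0 then c else if d > m then (fr : Int) else if d = m then c + (fr : Int) else c

theorem pv_sum_map_update {α : Type} [DecidableEq α] (l : List α) (f g : α → Nat) (x : α)
    (hx : x ∈ l) (hnd : l.Nodup) (hagree : ∀ y ∈ l, y ≠ x → g y = f y) :
    (l.map g).sum + f x = (l.map f).sum + g x := by
  induction l with
  | nil => cases hx
  | cons a t ih =>
    rcases List.mem_cons.mp hx with rfl | hxt
    · have : ∀ y ∈ t, g y = f y := by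
        intro y hy
        exact hagree y (List.mem_cons_of_mem _ hy) (fun h => (List.nodup_cons.mp hnd).1 (h ▸ hy))
      simp only [List.map_cons, List.sum_cons]
      have : (t.map g).sum = (t.map f).sum := by
        congr 1; exact List.map_congr_left this
      omega
    · have hax : a ≠ x := fun h => (List.nodup_cons.mp hnd).1 (h ▸ hxt)
      have hga : g a = f a := hagree a List.mem_cons_self hax
      have := ih hxt (List.nodup_cons.mp hnd).2 (fun y hy => hagree y (List.mem_cons_of_mem _ hy))
      simp only [List.map_cons, List.sum_cons, hga]
      omega

theorem pv_vget_eq (n : Int) (v : List Bool) (x : Int) (_hlen : v.length = (n + 1).toNat)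
    (h1 : 1 ≤ x) (_h2 : x ≤ n) : pvVGet v x = v.getD x.toNat false := by
  have hx : x = ((x.toNat : Nat) : Int) := (Int.toNat_of_nonneg (by omega)).symm
  rw [pvVGet, hx, PySem.List.pyGetD_natCast]
  have : (max x 0).toNat = x.toNat := by omega
  simp [List.getD, this]

theorem pv_vget_set_self (n : Int) (v : List Bool) (x : Int) (hlen : v.length = (n + 1).toNat)
    (h1 : 1 ≤ x) (h2 : x ≤ n) : pvVGet (PySem.List.pySetD v x true) x = true := by
  have hx : x = ((x.toNat : Nat) : Int) := (Int.toNat_of_nonneg (by omega)).symm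
  have hlt : x.toNat < v.length := by rw [hlen]; omega
  rw [pvVGet, hx, PySem.List.pyGetD_pySetD_natCast _ _ _ _ _ hlt]
  simp

theorem pv_vget_set_ne (n : Int) (v : List Bool) (x y : Int) (hlen : v.length = (n + 1).toNat)
    (h1 : 1 ≤ x) (h2 : x ≤ n) (h1y : 1 ≤ y) (hne : y ≠ x) :
    pvVGet (PySem.List.pySetD v x true) y = pvVGet v y := by
  have hx : x = ((x.toNat : Nat) : Int) := (Int.toNat_of_nonneg (by omega)).symm
  have hy : y = ((y.toNat : Nat) : Int) := (Int.toNat_of_nonneg (by omega)).symm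
  have hlt : x.toNat < v.length := by rw [hlen]; omega
  rw [pvVGet, pvVGet, hx, hy, PySem.List.pyGetD_pySetD_natCast _ _ _ _ _ hlt]
  have : ¬ (y.toNat = x.toNat) := by omega
  simp [this]

theorem pv_len_set (v : List Bool) (x : Int) :
    (PySem.List.pySetD v x true).length = v.length := by
  exact PySem.List.length_pySetD v x true

theorem pv_phi_set (n : Int) (G : PySem.Dict Int (List Int)) (v : List Bool) (x : Int)
    (hlen : v.length = (n + 1).toNat) (h1 : 1 ≤ x) (h2 : x ≤ n) (hfresh : pvVGet v x = false) :
    pvPhi n G (PySem.List.pySetD v x true) + (pvAdj G x).length = pvPhi n G v := by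
  have hmem : x ∈ pvNodes n := by rw [pvNodes]; exact PySem.List.mem_pyRange_one.mpr ⟨h1, by omega⟩
  have h := pv_sum_map_update (pvNodes n)
    (fun y => if pvVGet v y then 0 else (pvAdj G y).length)
    (fun y => if pvVGet (PySem.List.pySetD v x true) y then 0 else (pvAdj G y).length)
    x hmem (by rw [pvNodes]; exact PySem.List.nodup_pyRange_one 1 (n+1))
    (fun y hy hne => by
      have hy1 : 1 ≤ y := (PySem.List.mem_pyRange_one.mp (by rwa [pvNodes] at hy)).1
      simp only []
      rw [pv_vget_set_ne n v x y hlen h1 h2 hy1 hne])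
  rw [pvPhi, pvPhi]
  simp only [pv_vget_set_self n v x hlen h1 h2, hfresh] at h
  simpa using h

theorem pv_fc_set (n : Int) (v : List Bool) (x : Int)
    (hlen : v.length = (n + 1).toNat) (h1 : 1 ≤ x) (h2 : x ≤ n) (hfresh : pvVGet v x = false) :
    pvFC n (PySem.List.pySetD v x true) + 1 = pvFC n v := by
  have hmem : x ∈ pvNodes n := by rw [pvNodes]; exact PySem.List.mem_pyRange_one.mpr ⟨h1, by omega⟩
  have h := pv_sum_map_update (pvNodes n)
    (fun y => if pvVGet v y then 0 else 1)
    (fun y => if pvVGet (PySem.List.pySetD v x true) y then 0 else 1)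
    x hmem (by rw [pvNodes]; exact PySem.List.nodup_pyRange_one 1 (n+1))
    (fun y hy hne => by
      have hy1 : 1 ≤ y := (PySem.List.mem_pyRange_one.mp (by rwa [pvNodes] at hy)).1
      simp only []
      rw [pv_vget_set_ne n v x y hlen h1 h2 hy1 hne])
  rw [pvFC, pvFC]
  simp only [pv_vget_set_self n v x hlen h1 h2, hfresh] at h
  simpa using h

-- ProcA structural facts
theorem pv_procA_len (G : PySem.Dict Int (List Int)) (pend : List Int) (v : List Bool) :
    (pvProcA G v pend).1.length = v.length := by
  induction pend generalizing v with
  | nil => simp [pvProcA]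
  | cons x rest ih =>
    rw [pvProcA]
    by_cases h : pvVGet v x
    · simp only [h, if_true]; exact ih v
    · simp only [h, Bool.false_eq_true, if_false]
      rw [ih (PySem.List.pySetD v x true)]
      exact pv_len_set v x

theorem pv_procA_np_mem (G : PySem.Dict Int (List Int)) (pend : List Int) (v : List Bool) :
    ∀ y ∈ (pvProcA G v pend).2.2, ∃ x, y ∈ pvAdj G x := by
  induction pend generalizing v with
  | nil => simp [pvProcA]
  | cons x rest ih =>
    rw [pvProcA]
    by_cases h : pvVGet v x
    · simp only [h, if_true]; exact ih v
    · simp only [h, Bool.false_eq_true, if_false]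
      intro y hy
      rcases List.mem_append.mp hy with hy | hy
      · exact ⟨x, List.mem_of_mem_filter hy⟩
      · exact ih (PySem.List.pySetD v x true) y hy

theorem pv_procA_phi (n : Int) (G : PySem.Dict Int (List Int)) (pend : List Int) (v : List Bool)
    (hlen : v.length = (n + 1).toNat) (hpend : ∀ x ∈ pend, 1 ≤ x ∧ x ≤ n) :
    (pvProcA G v pend).2.2.length + pvPhi n G (pvProcA G v pend).1 ≤ pvPhi n G v := by
  induction pend generalizing v with
  | nil => simp [pvProcA]
  | cons x rest ih =>
    rw [pvProcA]
    by_cases h : pvVGet v x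
    · simp only [h, if_true]
      exact ih v hlen (fun z hz => hpend z (List.mem_cons_of_mem _ hz))
    · simp only [h, Bool.false_eq_true, if_false]
      have hx := hpend x List.mem_cons_self
      have hlen1 : (PySem.List.pySetD v x true).length = (n + 1).toNat := by
        rw [pv_len_set]; exact hlen
      have hih := ih (PySem.List.pySetD v x true) hlen1
        (fun z hz => hpend z (List.mem_cons_of_mem _ hz))
      have hphi := pv_phi_set n G v x hlen hx.1 hx.2 (by simpa using h)
      have hfl : ((pvAdj G x).filter
          (fun nb => !(pvVGet (PySem.List.pySetD v x true) nb))).length ≤ (pvAdj G x).length :=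
        List.length_filter_le _ _
      simp only [List.length_append]
      omega

theorem pv_procA_fc (n : Int) (G : PySem.Dict Int (List Int)) (pend : List Int) (v : List Bool)
    (hlen : v.length = (n + 1).toNat) (hpend : ∀ x ∈ pend, 1 ≤ x ∧ x ≤ n) :
    pvFC n (pvProcA G v pend).1 + (pvProcA G v pend).2.1 = pvFC n v := by
  induction pend generalizing v with
  | nil => simp [pvProcA]
  | cons x rest ih =>
    rw [pvProcA]
    by_cases h : pvVGet v x
    · simp only [h, if_true]
      exact ih v hlen (fun z hz => hpend z (List.mem_cons_of_mem _ hz))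
    · simp only [h, Bool.false_eq_true, if_false]
      have hx := hpend x List.mem_cons_self
      have hlen1 : (PySem.List.pySetD v x true).length = (n + 1).toNat := by
        rw [pv_len_set]; exact hlen
      have hih := ih (PySem.List.pySetD v x true) hlen1
        (fun z hz => hpend z (List.mem_cons_of_mem _ hz))
      have hfc := pv_fc_set n v x hlen hx.1 hx.2 (by simpa using h)
      omega

theorem pv_procA_zero (G : PySem.Dict Int (List Int)) (pend : List Int) (v : List Bool)
    (h : (pvProcA G v pend).2.1 = 0) : (pvProcA G v pend).1 = v ∧ (pvProcA G v pend).2.2 = [] := by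
  induction pend generalizing v with
  | nil => simp [pvProcA]
  | cons x rest ih =>
    rw [pvProcA] at h ⊢
    by_cases hv : pvVGet v x
    · simp only [hv, if_true] at h ⊢; exact ih v h
    · simp only [hv, Bool.false_eq_true, if_false] at h
      omega

theorem pv_upd_step (d m c : Int) (fr : Nat) :
    pvUpdM d (if d > m then d else m) fr = pvUpdM d m (fr + 1) ∧
    pvUpdC d (if d > m then d else m)
      (if d > m then 1 else if d = m then c + 1 else c) fr = pvUpdC d m c (fr + 1) := by
  constructor
  · simp only [pvUpdM]
    by_cases h0 : fr = 0 <;> by_cases hdm : d > m <;> simp [h0, hdm]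
  · simp only [pvUpdC]
    by_cases h0 : fr = 0 <;> by_cases hdm : d > m <;> by_cases hde : d = m <;>
      simp [h0, hdm, hde] <;> omega

-- one level of A's queue loop equals pvProcA
theorem pv_levelA (n : Int) (G : PySem.Dict Int (List Int)) (pend : List Int) :
    ∀ (v : List Bool) (nq : List Int) (d m c : Int) (f : Nat),
    v.length = (n + 1).toNat →
    (∀ x ∈ pend, 1 ≤ x ∧ x ≤ n) →
    (pend.length + nq.length) + pvPhi n G v ≤ f →
    bfsLoopA G f (pend.map (fun x => (x, d)) ++ nq.map (fun x => (x, d + 1))) v m c =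
      bfsLoopA G (f - pend.length)
        ((nq ++ (pvProcA G v pend).2.2).map (fun x => (x, d + 1)))
        (pvProcA G v pend).1 (pvUpdM d m (pvProcA G v pend).2.1)
        (pvUpdC d m c (pvProcA G v pend).2.1) := by
  induction pend with
  | nil =>
    intro v nq d m c f hlen hpend hfuel
    simp [pvProcA, pvUpdM, pvUpdC]
  | cons x rest ih =>
    intro v nq d m c f hlen hpend hfuel
    simp only [List.length_cons] at hfuel
    obtain ⟨f', rfl⟩ : ∃ f', f = f' + 1 := ⟨f - 1, by omega⟩
    simp only [List.map_cons, List.cons_append]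
    rw [bfsLoopA]
    have hx := hpend x List.mem_cons_self
    have hfe : f' + 1 - (x :: rest).length = f' - rest.length := by
      simp only [List.length_cons]; omega
    rw [hfe]
    by_cases hv : PySem.List.pyGetD v x false = true
    · rw [if_pos hv, pvProcA]
      simp only [show pvVGet v x = true from hv, if_true]
      exact ih v nq d m c f' hlen (fun z hz => hpend z (List.mem_cons_of_mem _ hz)) (by omega)
    · rw [if_neg hv]
      have hvf : pvVGet v x = false := by simpa using hv
      have hlen1 : (PySem.List.pySetD v x true).length = (n + 1).toNat := by
        rw [pv_len_set]; exact hlen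
      have hphi := pv_phi_set n G v x hlen hx.1 hx.2 hvf
      rw [PySem.List.foldl_append_if
        (fun nb => !(PySem.List.pyGetD (PySem.List.pySetD v x true) nb false))
        (fun nb => (nb, d + 1))]
      have hq : (rest.map (fun x => (x, d)) ++ nq.map (fun x => (x, d + 1))) ++
            ((PySem.Dict.getD G x []).filter
              (fun nb => !(PySem.List.pyGetD (PySem.List.pySetD v x true) nb false))).map
              (fun nb => (nb, d + 1))
          = rest.map (fun x => (x, d)) ++
            (nq ++ (PySem.Dict.getD G x []).filter
              (fun nb => !(PySem.List.pyGetD (PySem.List.pySetD v x true) nb false))).map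
              (fun x => (x, d + 1)) := by
        rw [List.map_append, List.append_assoc]
      rw [hq]
      have hfl : ((PySem.Dict.getD G x []).filter
          (fun nb => !(PySem.List.pyGetD (PySem.List.pySetD v x true) nb false))).length
          ≤ (pvAdj G x).length := List.length_filter_le _ _
      rw [pvAdj] at hphi hfl
      rw [ih (PySem.List.pySetD v x true)
        (nq ++ (PySem.Dict.getD G x []).filter
          (fun nb => !(PySem.List.pyGetD (PySem.List.pySetD v x true) nb false)))
        d (if d > m then d else m) (if d > m then 1 else if d = m then c + 1 else c) f'
        hlen1 (fun z hz => hpend z (List.mem_cons_of_mem _ hz))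
        (by simp only [List.length_append]; omega)]
      rw [pvProcA]
      simp only [hvf, Bool.false_eq_true, if_false]
      have hcomp := pv_upd_step d m c (pvProcA G (PySem.List.pySetD v x true) rest).2.1
      rw [hcomp.1, hcomp.2]
      simp only [pvAdj, pvVGet, List.append_assoc]

-- B's fold over one level equals pvProcA through the visited-representation relation
theorem pv_bridge (n : Int) (G : PySem.Dict Int (List Int))
    (hadj : ∀ x y, y ∈ pvAdj G x → 1 ≤ y ∧ y ≤ n) (pend : List Int) :
    ∀ (v : List Bool) (s : PySem.Set Int) (fr0 : Int) (acc0 : List Int),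
    v.length = (n + 1).toNat →
    pvRel n v s →
    (∀ x ∈ pend, 1 ≤ x ∧ x ≤ n) →
    pvRel n (pvProcA G v pend).1 (pend.foldl (levelB G) (s, fr0, acc0)).1 ∧
    (pend.foldl (levelB G) (s, fr0, acc0)).2.1 = fr0 + ((pvProcA G v pend).2.1 : Int) ∧
    (pend.foldl (levelB G) (s, fr0, acc0)).2.2 = acc0 ++ (pvProcA G v pend).2.2 := by
  induction pend with
  | nil =>
    intro v s fr0 acc0 hlen hrel hpend
    simpa [pvProcA] using hrel
  | cons x rest ih =>
    intro v s fr0 acc0 hlen hrel hpend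
    have hx := hpend x List.mem_cons_self
    have hrest := fun z hz => hpend z (List.mem_cons_of_mem _ hz)
    simp only [List.foldl_cons]
    rw [pvProcA, levelB]
    by_cases hv : pvVGet v x
    · have hc : PySem.Set.contains s x = true := by rw [← hrel x hx.1 hx.2]; exact hv
      simp only [hv, if_true, hc]
      exact ih v s fr0 acc0 hlen hrel hrest
    · have hc : PySem.Set.contains s x = false := by
        rw [← hrel x hx.1 hx.2]; simpa using hv
      simp only [hv, Bool.false_eq_true, if_false, hc]
      have hrel1 : pvRel n (PySem.List.pySetD v x true) (PySem.Set.add s x) := by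
        intro y hy1 hy2
        by_cases hyx : y = x
        · subst hyx
          rw [pv_vget_set_self n v y hlen hy1 hy2]
          have : y ∈ PySem.Set.add s y := (PySem.Set.mem_add _ _ _).mpr (Or.inr rfl)
          exact ((PySem.Set.contains_iff _ _).mpr this).symm
        · rw [pv_vget_set_ne n v x y hlen hx.1 hx.2 hy1 hyx, hrel y hy1 hy2]
          rcases h' : PySem.Set.contains s y with _ | _
          · symm
            rw [← Bool.not_eq_true]
            intro hcon
            have := (PySem.Set.mem_add _ _ _).mp ((PySem.Set.contains_iff _ _).mp hcon)
            rcases this with h'' | h''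
            · rw [(PySem.Set.contains_iff _ _).mpr h''] at h'; exact absurd h' (by simp)
            · exact hyx h''
          · symm
            exact (PySem.Set.contains_iff _ _).mpr
              ((PySem.Set.mem_add _ _ _).mpr (Or.inl ((PySem.Set.contains_iff _ _).mp h')))
      have hfilt : (PySem.Dict.getD G x []).filter
            (fun nb => !(PySem.Set.contains (PySem.Set.add s x) nb))
          = (PySem.Dict.getD G x []).filter
            (fun nb => !(pvVGet (PySem.List.pySetD v x true) nb)) := by
        apply List.filter_congr
        intro nb hnb
        have hb := hadj x nb (by rwa [pvAdj])
        rw [hrel1 nb hb.1 hb.2]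
      rw [hfilt]
      have hih := ih (PySem.List.pySetD v x true) (PySem.Set.add s x) (fr0 + 1)
        (acc0 ++ (PySem.Dict.getD G x []).filter
          (fun nb => !(pvVGet (PySem.List.pySetD v x true) nb)))
        (by rw [pv_len_set]; exact hlen) hrel1 hrest
      refine ⟨hih.1, ?_, ?_⟩
      · rw [hih.2.1]; push_cast; ring
      · rw [hih.2.2, List.append_assoc]
        simp [pvAdj]

-- the two loops agree level by level
theorem pv_outer (n : Int) (G : PySem.Dict Int (List Int))
    (hadj : ∀ x y, y ∈ pvAdj G x → 1 ≤ y ∧ y ≤ n) :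
    ∀ (fB : Nat) (pend : List Int) (v : List Bool) (s : PySem.Set Int) (d m c : Int) (fA : Nat),
    v.length = (n + 1).toNat →
    (∀ x ∈ pend, 1 ≤ x ∧ x ≤ n) →
    pvRel n v s →
    m ≤ d → (m = d → c = 0) →
    pend.length + pvPhi n G v ≤ fA →
    pvFC n v + 2 ≤ fB →
    bfsLoopA G fA (pend.map (fun x => (x, d))) v m c = bfsLoopB G fB s pend c := by
  intro fB
  induction fB with
  | zero =>
    intro pend v s d m c fA hlen hpend hrel hmd hmc hfA hfB
    omega
  | succ fB ih =>
    intro pend v s d m c fA hlen hpend hrel hmd hmc hfA hfB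
    rw [bfsLoopB]
    rcases hpe : pend.isEmpty with _ | _
    · -- pend nonempty
      simp only [Bool.false_eq_true, if_false]
      have hA := pv_levelA n G pend v [] d m c fA hlen hpend (by simpa using hfA)
      simp only [List.map_nil, List.append_nil, List.nil_append] at hA
      rw [hA]
      have hB := pv_bridge n G hadj pend v s 0 [] hlen hrel hpend
      simp only [List.nil_append, Int.zero_add] at hB
      by_cases hfr : (pvProcA G v pend).2.1 = 0
      · have hz := pv_procA_zero G pend v hfr
        rw [hfr] at hB
        rw [hz.2]
        simp [pvUpdM, pvUpdC, hfr]
        have hst1 : (pend.foldl (levelB G) (s, (0:Int), ([]:List Int))).2.1 = 0 := by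
          rw [hB.2.1]; simp
        have hst2 : (pend.foldl (levelB G) (s, (0:Int), ([]:List Int))).2.2 = [] := by
          rw [hB.2.2, hz.2]
        rw [hst1, hst2]
        cases fB with
        | zero => cases (fA - pend.length) with | zero => rfl | succ f => rfl
        | succ fB' =>
          rw [bfsLoopB]
          simp only [if_true]
          cases (fA - pend.length) with | zero => rfl | succ f => rfl
      · -- productive level
        have hnp : ∀ x ∈ (pvProcA G v pend).2.2, 1 ≤ x ∧ x ≤ n := by
          intro y hy
          obtain ⟨x, hx⟩ := pv_procA_np_mem G pend v y hy
          exact hadj x y hx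
        have hlen' : (pvProcA G v pend).1.length = (n + 1).toNat := by
          rw [pv_procA_len]; exact hlen
        have hphi := pv_procA_phi n G pend v hlen hpend
        have hfc := pv_procA_fc n G pend v hlen hpend
        have hst1 : (pend.foldl (levelB G) (s, (0:Int), ([]:List Int))).2.1
            = ((pvProcA G v pend).2.1 : Int) := hB.2.1
        have hst2 : (pend.foldl (levelB G) (s, (0:Int), ([]:List Int))).2.2
            = (pvProcA G v pend).2.2 := hB.2.2
        have hcnt : (if (pend.foldl (levelB G) (s, (0:Int), ([]:List Int))).2.1 ≠ 0
              then (pend.foldl (levelB G) (s, (0:Int), ([]:List Int))).2.1 else c)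
            = pvUpdC d m c (pvProcA G v pend).2.1 := by
          rw [hst1]
          have : ((pvProcA G v pend).2.1 : Int) ≠ 0 := by
            exact_mod_cast hfr
          rw [if_pos this]
          simp only [pvUpdC, hfr, if_false]
          rcases lt_or_eq_of_le hmd with h' | h'
          · rw [if_pos h']
          · rw [if_neg (by omega), if_pos h'.symm, hmc h', zero_add]
        simp only [hst2, hcnt]
        apply ih (pvProcA G v pend).2.2 (pvProcA G v pend).1
          (pend.foldl (levelB G) (s, (0:Int), ([]:List Int))).1 (d + 1)
          (pvUpdM d m (pvProcA G v pend).2.1) (pvUpdC d m c (pvProcA G v pend).2.1)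
          (fA - pend.length) hlen' hnp hB.1
        · simp only [pvUpdM, hfr, if_false]; split_ifs <;> omega
        · intro hmeq; exfalso
          simp only [pvUpdM, hfr, if_false] at hmeq
          split_ifs at hmeq <;> omega
        · omega
        · omega
    · -- pend empty
      have hnil : pend = [] := List.isEmpty_iff.mp hpe
      subst hnil
      simp only [if_true, List.map_nil]
      cases fA with | zero => rfl | succ f => rfl

-- facts about the built graph
theorem pv_graph_init_empty (n : Int) (x : Int) :
    (((PySem.List.pyRange 1 (n + 1) 1).foldl (fun g i => g.insert i ([] : List Int))
      PySem.Dict.empty).getD x []) = [] := by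
  suffices h : ∀ (l : List Int) (g : PySem.Dict Int (List Int)),
      (∀ y, g.getD y ([] : List Int) = []) →
      ∀ y, (l.foldl (fun g i => g.insert i ([] : List Int)) g).getD y [] = [] by
    exact h (PySem.List.pyRange 1 (n + 1) 1) PySem.Dict.empty (fun y => by simp [pysem]) x
  intro l
  induction l with
  | nil => intro g hg y; exact hg y
  | cons a t ih =>
    intro g hg y
    simp only [List.foldl_cons]
    apply ih
    intro z
    rw [PySem.Dict.getD_insert]
    split_ifs
    · rfl
    · exact hg z

theorem pv_degsum_modify (n : Int) (g : PySem.Dict Int (List Int)) (a w : Int)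
    (h1 : 1 ≤ a) (h2 : a ≤ n) :
    ((pvNodes n).map (fun y => ((g.modify a [] (fun l => l ++ [w])).getD y ([] : List Int)).length)).sum
      = ((pvNodes n).map (fun y => (g.getD y ([] : List Int)).length)).sum + 1 := by
  have hmem : a ∈ pvNodes n := by rw [pvNodes]; exact PySem.List.mem_pyRange_one.mpr ⟨h1, by omega⟩
  have h := pv_sum_map_update (pvNodes n)
    (fun y => (g.getD y ([] : List Int)).length)
    (fun y => ((g.modify a [] (fun l => l ++ [w])).getD y ([] : List Int)).length)
    a hmem (by rw [pvNodes]; exact PySem.List.nodup_pyRange_one 1 (n + 1))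
    (fun y hy hne => by
      simp only []
      rw [PySem.Dict.getD_modify, if_neg hne])
  have hga : (g.modify a [] (fun l => l ++ [w])).getD a ([] : List Int) = g.getD a [] ++ [w] := by
    rw [PySem.Dict.getD_modify, if_pos rfl]
  simp only [hga, List.length_append, List.length_cons, List.length_nil] at h
  omega

theorem pv_graph_values (n : Int) (edge : List (List Int))
    (hpre : ∀ e ∈ edge, e.length = 2 ∧ ∀ v ∈ e, 1 ≤ v ∧ v ≤ n) :
    ∀ x y, y ∈ pvAdj (buildGraphA n edge) x → 1 ≤ y ∧ y ≤ n := by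
  suffices h : ∀ (es : List (List Int)) (g : PySem.Dict Int (List Int)),
      (∀ e ∈ es, e.length = 2 ∧ ∀ v ∈ e, 1 ≤ v ∧ v ≤ n) →
      (∀ x y, y ∈ g.getD x ([] : List Int) → 1 ≤ y ∧ y ≤ n) →
      ∀ x y, y ∈ (es.foldl (fun g e =>
          match e with
          | [a, b] => (g.modify a [] (fun l => l ++ [b])).modify b [] (fun l => l ++ [a])
          | _ => g) g).getD x ([] : List Int) → 1 ≤ y ∧ y ≤ n by
    intro x y hy
    refine h edge ((PySem.List.pyRange 1 (n + 1) 1).foldl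
        (fun g i => g.insert i ([] : List Int)) PySem.Dict.empty)
      hpre (fun x' y' hy' => ?_) x y (by rwa [pvAdj, buildGraphA] at hy)
    rw [pv_graph_init_empty] at hy'
    cases hy'
  intro es
  induction es with
  | nil => intro g hes hg; exact hg
  | cons e t ih =>
    intro g hes hg
    simp only [List.foldl_cons]
    obtain ⟨hlen2, hbnd⟩ := hes e List.mem_cons_self
    obtain ⟨a, b, rfl⟩ : ∃ a b, e = [a, b] := by
      match e, hlen2 with
      | [a, b], _ => exact ⟨a, b, rfl⟩
    apply ih _ (fun e' he' => hes e' (List.mem_cons_of_mem _ he'))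
    intro x y hy
    rw [PySem.Dict.getD_modify] at hy
    have hga := hbnd a (by simp)
    have hgb := hbnd b (by simp)
    split_ifs at hy with hxb
    · rcases List.mem_append.mp hy with hy | hy
      · rw [PySem.Dict.getD_modify] at hy
        split_ifs at hy with hba
        · rcases List.mem_append.mp hy with hy | hy
          · exact hg a y hy
          · rw [List.mem_singleton.mp hy]; exact hgb
        · exact hg b y hy
      · rw [List.mem_singleton.mp hy]; exact hga
    · rw [PySem.Dict.getD_modify] at hy
      split_ifs at hy with hxa
      · rcases List.mem_append.mp hy with hy | hy
        · exact hg a y hy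
        · rw [List.mem_singleton.mp hy]; exact hgb
      · exact hg x y hy

theorem pv_graph_degsum (n : Int) (edge : List (List Int))
    (hpre : ∀ e ∈ edge, e.length = 2 ∧ ∀ v ∈ e, 1 ≤ v ∧ v ≤ n) :
    ((pvNodes n).map (fun y => (pvAdj (buildGraphA n edge) y).length)).sum = 2 * edge.length := by
  suffices h : ∀ (es : List (List Int)) (g : PySem.Dict Int (List Int)),
      (∀ e ∈ es, e.length = 2 ∧ ∀ v ∈ e, 1 ≤ v ∧ v ≤ n) →
      ((pvNodes n).map (fun y => ((es.foldl (fun g e =>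
          match e with
          | [a, b] => (g.modify a [] (fun l => l ++ [b])).modify b [] (fun l => l ++ [a])
          | _ => g) g).getD y ([] : List Int)).length)).sum
        = ((pvNodes n).map (fun y => (g.getD y ([] : List Int)).length)).sum + 2 * es.length by
    have h0 : ((pvNodes n).map (fun y =>
        (((PySem.List.pyRange 1 (n + 1) 1).foldl (fun g i => g.insert i ([] : List Int))
          PySem.Dict.empty).getD y ([] : List Int)).length)).sum = 0 := by
      rw [List.map_congr_left (fun y _ => by rw [pv_graph_init_empty n y])]
      simp
    have := h edge ((PySem.List.pyRange 1 (n + 1) 1).foldl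
      (fun g i => g.insert i ([] : List Int)) PySem.Dict.empty) hpre
    rw [h0] at this
    simpa [pvAdj, buildGraphA] using this
  intro es
  induction es with
  | nil => intro g hes; simp
  | cons e t ih =>
    intro g hes
    simp only [List.foldl_cons]
    obtain ⟨hlen2, hbnd⟩ := hes e List.mem_cons_self
    obtain ⟨a, b, rfl⟩ : ∃ a b, e = [a, b] := by
      match e, hlen2 with
      | [a, b], _ => exact ⟨a, b, rfl⟩
    rw [ih ((g.modify a [] (fun l => l ++ [b])).modify b [] (fun l => l ++ [a]))
      (fun e' he' => hes e' (List.mem_cons_of_mem _ he'))]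
    have hb := hbnd b (by simp)
    have ha := hbnd a (by simp)
    rw [pv_degsum_modify n _ b a hb.1 hb.2, pv_degsum_modify n g a b ha.1 ha.2]
    simp only [List.length_cons]
    ring

-- ===== VERDICT (by name: the statement is the Claim_ definition above) =====
theorem solution_spec : Claim_equal_solution := by
  intro n edge hdom hpre
  show solution n edge = solution_alt n edge
  obtain ⟨hn, hedge⟩ := hpre
  have hadj := pv_graph_values n edge hedge
  have hGB : buildGraphB n edge = buildGraphA n edge := rfl
  rw [solution, solution_alt, hGB]
  have hlenv : (List.replicate (n + 1).toNat false).length = (n + 1).toNat := by simp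
  have hrel0 : pvRel n (List.replicate (n + 1).toNat false) PySem.Set.empty := by
    intro x hx1 hx2
    rw [pv_vget_eq n _ x hlenv hx1 hx2]
    have hxlt : x.toNat < (n + 1).toNat := by omega
    simp [List.getD, PySem.Set.empty, hxlt]
  have hvfalse : ∀ y ∈ pvNodes n, pvVGet (List.replicate (n + 1).toNat false) y = false := by
    intro y hy
    obtain ⟨hy1, hy2⟩ := PySem.List.mem_pyRange_one.mp (by rwa [pvNodes] at hy)
    rw [pv_vget_eq n _ y hlenv hy1 (by omega)]
    have hylt : y.toNat < (n + 1).toNat := by omega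
    simp [List.getD, hylt]
  have hphi0 : pvPhi n (buildGraphA n edge) (List.replicate (n + 1).toNat false)
      = 2 * edge.length := by
    rw [pvPhi, List.map_congr_left
      (g := fun y => (pvAdj (buildGraphA n edge) y).length)
      (fun y hy => by rw [hvfalse y hy]; simp)]
    exact pv_graph_degsum n edge hedge
  have hfc0 : pvFC n (List.replicate (n + 1).toNat false) = n.toNat := by
    rw [pvFC, List.map_congr_left (g := fun _ => (1 : Nat))
      (fun y hy => by rw [hvfalse y hy]; simp)]
    have : ((pvNodes n).map (fun _ => (1 : Nat))).sum = (pvNodes n).length := by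
      simp [List.map_const']
    rw [this, pvNodes, PySem.List.length_pyRange_one]
    omega
  have h := pv_outer n (buildGraphA n edge) hadj (n.toNat + 2) [1]
    (List.replicate (n + 1).toNat false) PySem.Set.empty 0 0 0 (2 * edge.length + 2)
    hlenv (by intro x hx; simp at hx; subst hx; exact ⟨le_refl 1, hn⟩) hrel0
    (le_refl 0) (fun _ => rfl)
    (by rw [hphi0]; simp; omega)
    (by rw [hfc0])
  simpa using h
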